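-- pv_equiv track=rewrite | github.com/mikylab/exptrack | exptrack/capture/session_hooks.py | is_scratch_cell
-- ===== SOURCE A (Python) =====
-- def is_scratch_cell(source: str) -> bool:
--     """Return True if a cell source begins with %%scratch."""
--     if not source:
--         return False
--     for ln in source.splitlines():
--         s = ln.strip()
--         if not s:
--             continue
--         return s.startswith("%%scratch")
--     return False
-- ===== SOURCE B (Python) =====
-- def is_scratch_cell(source: str) -> bool:
--     """Return True if a cell source begins with %%scratch."""
--     return source.lstrip().startswith("%%scratch")
-- ===== Notes on version B (the rewrite author's own statement) =====
-- stated objective: idiomatic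
-- what changed: Replaces the explicit splitlines loop that skips blank lines with a single expression: strip leading whitespace from the whole source and test the prefix; correct because every line-break character is itself whitespace, so lstrip lands exactly on the first non-blank line's first stripped character, and the pattern contains no whitespace.
import Mathlib
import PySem

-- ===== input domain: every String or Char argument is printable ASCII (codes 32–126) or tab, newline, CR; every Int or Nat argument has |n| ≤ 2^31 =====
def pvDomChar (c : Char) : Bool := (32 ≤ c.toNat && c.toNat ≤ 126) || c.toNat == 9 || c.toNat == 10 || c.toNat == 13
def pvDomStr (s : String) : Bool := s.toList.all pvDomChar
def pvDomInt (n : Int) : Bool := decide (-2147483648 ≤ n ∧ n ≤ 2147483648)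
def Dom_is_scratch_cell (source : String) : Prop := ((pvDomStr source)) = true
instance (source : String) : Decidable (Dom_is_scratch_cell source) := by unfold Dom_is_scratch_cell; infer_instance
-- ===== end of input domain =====

-- B replaces A's splitlines loop (skip blank lines, test the first non-blank line) by one
-- expression: lstrip the whole source and test the prefix (idiomatic; same behaviour because
-- every line-break character is whitespace and the pattern contains none).

-- ===== PORT A =====
-- the 'for ln in source.splitlines(): …' loop with its early return
def pvScanLines : List String → Bool
  | [] => false
  | ln :: rest =>
    let s := PySem.Str.strip ln
    if PySem.Str.len s = 0 then pvScanLines rest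
    else PySem.Str.startswith s "%%scratch"

def is_scratch_cell (source : String) : Bool :=
  if PySem.Str.len source = 0 then false
  else pvScanLines (PySem.Str.splitlines source)

-- ===== PORT B =====
def is_scratch_cell_alt (source : String) : Bool :=
  PySem.Str.startswith (PySem.Str.lstrip source) "%%scratch"

-- ===== PRECONDITION & SPEC =====
def Spec_is_scratch_cell (source : String) (out : Bool) : Prop := out = is_scratch_cell_alt source
instance (source : String) (out : Bool) : Decidable (Spec_is_scratch_cell source out) := by unfold Spec_is_scratch_cell; infer_instance

-- ===== CLAIM (what is proved, stated in full; the proofs are below) =====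
def Claim_equal_is_scratch_cell : Prop := ∀ (source : String), Dom_is_scratch_cell source → Spec_is_scratch_cell source (is_scratch_cell source)

-- ===== LEMMAS AND PROOFS =====

-- the line-break predicate PySem.Chars.splitlines uses (copied verbatim)
def pvIsB (c : Char) : Bool :=
  have n := c.toNat
  decide (n = 10) || decide (n = 13) || decide (n = 11) || decide (n = 12) || decide (n = 28) ||
    decide (n = 29) || decide (n = 30) || decide (n = 133) || decide (n = 8232) || decide (n = 8233)

-- splitlines.go without the accumulator
def pvLines : List Char → List Char → List (List Char)
  | [], cur => if cur.isEmpty then [] else [cur.reverse]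
  | '\x0d' :: '\n' :: rest, cur => cur.reverse :: pvLines rest []
  | c :: rest, cur => if pvIsB c then cur.reverse :: pvLines rest [] else pvLines rest (c :: cur)

-- A's loop on the char-list side
def pvScanChars : List (List Char) → Bool
  | [] => false
  | l :: rest =>
    let s := PySem.Chars.strip l
    if s.length = 0 then pvScanChars rest
    else PySem.Chars.startswith s "%%scratch".toList

lemma pv_go_eq (cs cur : List Char) :
    ∀ acc, PySem.Chars.splitlines.go pvIsB cs cur acc = acc.reverse ++ pvLines cs cur := by
  induction cs, cur using pvLines.induct with
  | case1 cur h => intro acc; simp [PySem.Chars.splitlines.go, pvLines, h]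
  | case2 cur h => intro acc; simp [PySem.Chars.splitlines.go, pvLines, h]
  | case3 rest cur ih =>
      intro acc
      rw [PySem.Chars.splitlines.go, pvLines.eq_2, ih]
      simp
  | case4 c rest cur hne hb ih =>
      intro acc
      rw [PySem.Chars.splitlines.go.eq_3 _ _ _ _ _ hne, pvLines.eq_3 _ _ _ hne, if_pos hb,
        if_pos hb, ih]
      simp
  | case5 c rest cur hne hb ih =>
      intro acc
      rw [PySem.Chars.splitlines.go.eq_3 _ _ _ _ _ hne, pvLines.eq_3 _ _ _ hne,
        if_neg hb, if_neg hb, ih]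

lemma pv_splitlines_eq (cs : List Char) : PySem.Chars.splitlines cs = pvLines cs [] := by
  have h := pv_go_eq cs [] []
  simpa [PySem.Chars.splitlines, pvIsB] using h

lemma pv_isB_isspace (c : Char) (h : pvIsB c = true) : PySem.Chars.isspace c = true := by
  simp [pvIsB] at h
  simp [PySem.Chars.isspace]
  omega

lemma pv_strip_blank (l : List Char) (h : ∀ x ∈ l, PySem.Chars.isspace x = true) :
    PySem.Chars.strip l = [] := by
  simp [PySem.Chars.strip, PySem.Chars.lstrip, PySem.Chars.rstrip,
    List.dropWhile_eq_nil_iff.mpr h]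

lemma pv_prefix_drop (pat : List Char) (hp : ∀ x ∈ pat, PySem.Chars.isspace x = false) :
    ∀ (s z : List Char), (z = [] ∨ ∃ d z', z = d :: z' ∧ PySem.Chars.isspace d = true) →
    pat.isPrefixOf (s ++ z) = pat.isPrefixOf s := by
  induction pat with
  | nil => intro s z _; simp [List.isPrefixOf]
  | cons p ps ih =>
      intro s z hz
      cases s with
      | nil =>
          rcases hz with rfl | ⟨d, z', rfl, hd⟩
          · rfl
          · simp only [List.nil_append, List.isPrefixOf]
            have hpd : (p == d) = false := by
              by_cases hpd' : p = d
              · subst hpd'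
                exact absurd hd (by simp [hp p (by simp)])
              · simp [hpd']
            simp [hpd]
      | cons a s' =>
          simp only [List.cons_append, List.isPrefixOf]
          rw [ih (fun x hx => hp x (by simp [hx])) s' z hz]

lemma pv_lines_head (cs : List Char) : ∀ (cur : List Char), cur ≠ [] →
    ∃ t, pvLines cs cur = (cur.reverse ++ cs.takeWhile (fun x => !pvIsB x)) :: t := by
  induction cs with
  | nil =>
      intro cur h
      exact ⟨[], by simp [pvLines.eq_1, h]⟩
  | cons c rest ih =>
      intro cur h
      by_cases hb : pvIsB c = true
      · have htw : List.takeWhile (fun x => !pvIsB x) (c :: rest) = [] := by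
          simp [hb]
        by_cases hcr : c = '\x0d' ∧ ∃ r, rest = '\n' :: r
        · obtain ⟨rfl, r, rfl⟩ := hcr
          exact ⟨pvLines r [], by rw [pvLines.eq_2, htw, List.append_nil]⟩
        · refine ⟨pvLines rest [], ?_⟩
          rw [pvLines.eq_3 _ _ _ (fun r hc hr => hcr ⟨hc, r, hr⟩), if_pos hb, htw,
            List.append_nil]
      · have hne : ∀ (r : List Char), c = '\x0d' → rest = '\n' :: r → False := by
          intro r hc hr; exact hb (by rw [hc]; decide)
        obtain ⟨t, ht⟩ := ih (c :: cur) (by simp)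
        refine ⟨t, ?_⟩
        rw [pvLines.eq_3 _ _ _ hne, if_neg (by simp [hb]), ht]
        simp [hb]

lemma pv_dropWhile_head (p : Char → Bool) (l : List Char) :
    List.dropWhile p l = [] ∨
      ∃ d z, List.dropWhile p l = d :: z ∧ p d = false := by
  induction l with
  | nil => exact Or.inl rfl
  | cons a l ih =>
      by_cases ha : p a = true
      · simpa [ha] using ih
      · exact Or.inr ⟨a, l, by simp [ha], by simp [ha]⟩

lemma pv_dropWhile_all (p : Char → Bool) (xs ys : List Char) (h : ∀ x ∈ xs, p x = true) :
    List.dropWhile p (xs ++ ys) = List.dropWhile p ys := by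
  induction xs with
  | nil => rfl
  | cons a xs ih =>
      simp only [List.cons_append, List.dropWhile_cons, h a (by simp), if_pos rfl]
      exact ih (fun x hx => h x (by simp [hx]))

lemma pv_pat_chars : "%%scratch".toList = ['%', '%', 's', 'c', 'r', 'a', 't', 'c', 'h'] := by rfl

lemma pv_pat_nonspace : ∀ x ∈ "%%scratch".toList, PySem.Chars.isspace x = false := by
  rw [pv_pat_chars]
  intro x hx
  fin_cases hx <;> decide

lemma pv_main (cs cur : List Char) (hcur : ∀ x ∈ cur, PySem.Chars.isspace x = true) :
    pvScanChars (pvLines cs cur) =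
      PySem.Chars.startswith (List.dropWhile PySem.Chars.isspace cs) "%%scratch".toList := by
  induction cs, cur using pvLines.induct with
  | case1 cur h =>
      rw [pvLines.eq_1, if_pos h]
      simp [pvScanChars, PySem.Chars.startswith]
  | case2 cur h =>
      rw [pvLines.eq_1, if_neg h]
      have hb : PySem.Chars.strip cur.reverse = [] :=
        pv_strip_blank _ (by intro x hx; exact hcur x (by simpa using hx))
      simp [pvScanChars, hb, PySem.Chars.startswith]
  | case3 rest cur ih =>
      have hb : PySem.Chars.strip cur.reverse = [] :=
        pv_strip_blank _ (by intro x hx; exact hcur x (by simpa using hx))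
      rw [pvLines.eq_2]
      simp only [pvScanChars, hb, List.length_nil, if_pos rfl]
      rw [ih (by simp)]
      simp [List.dropWhile_cons, show PySem.Chars.isspace '\x0d' = true from by decide,
        show PySem.Chars.isspace '\n' = true from by decide]
  | case4 c rest cur hne hb ih =>
      have hb' : PySem.Chars.strip cur.reverse = [] :=
        pv_strip_blank _ (by intro x hx; exact hcur x (by simpa using hx))
      rw [pvLines.eq_3 _ _ _ hne, if_pos hb]
      simp only [pvScanChars, hb', List.length_nil, if_pos rfl]
      rw [ih (by simp)]
      simp [List.dropWhile_cons, pv_isB_isspace c hb]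
  | case5 c rest cur hne hb ih =>
      by_cases hs : PySem.Chars.isspace c = true
      · -- plain whitespace (space or tab): accumulated into cur
        rw [pvLines.eq_3 _ _ _ hne, if_neg hb]
        rw [ih (by intro x hx
                   rcases List.mem_cons.mp hx with rfl | hx
                   · exact hs
                   · exact hcur x hx)]
        simp [hs]
      · -- first non-whitespace character: the current line decides everything
        rw [pvLines.eq_3 _ _ _ hne, if_neg hb]
        obtain ⟨t, ht⟩ := pv_lines_head rest (c :: cur) (by simp)
        rw [ht]
        set T := List.takeWhile (fun x => !pvIsB x) rest with hT
        have hline : (c :: cur).reverse ++ T = cur.reverse ++ ([c] ++ T) := by simp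
        rw [hline]
        have hls : PySem.Chars.strip (cur.reverse ++ ([c] ++ T)) =
            PySem.Chars.rstrip (c :: T) := by
          unfold PySem.Chars.strip PySem.Chars.lstrip
          rw [pv_dropWhile_all _ _ _ (by intro x hx; exact hcur x (by simpa using hx))]
          simp [hs]
        have hsplit : c :: T = PySem.Chars.rstrip (c :: T) ++
            (List.takeWhile PySem.Chars.isspace (c :: T).reverse).reverse := by
          unfold PySem.Chars.rstrip
          conv_lhs => rw [← List.reverse_reverse (c :: T),
            ← List.takeWhile_append_dropWhile (p := PySem.Chars.isspace) (l := (c :: T).reverse)]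
          rw [List.reverse_append]
        have hnonempty : (PySem.Chars.rstrip (c :: T)).length ≠ 0 := by
          intro hlen
          have hnil : PySem.Chars.rstrip (c :: T) = [] := List.eq_nil_of_length_eq_zero hlen
          unfold PySem.Chars.rstrip at hnil
          have : List.dropWhile PySem.Chars.isspace (c :: T).reverse = [] := by
            simpa using congrArg List.reverse hnil
          have hc : PySem.Chars.isspace c = true :=
            List.dropWhile_eq_nil_iff.mp this c (by simp)
          exact hs hc
        simp only [pvScanChars, hls, if_neg hnonempty]
        -- right-hand side: the first character is not whitespace
        rw [show List.dropWhile PySem.Chars.isspace (c :: rest) = c :: rest by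
          simp [List.dropWhile_cons, hs]]
        -- split rest after the first line
        have hrest : rest = T ++ List.dropWhile (fun x => !pvIsB x) rest :=
          (List.takeWhile_append_dropWhile).symm
        unfold PySem.Chars.startswith
        set W := (List.takeWhile PySem.Chars.isspace (c :: T).reverse).reverse with hW
        set R := List.dropWhile (fun x => !pvIsB x) rest with hR
        have hz : W ++ R = [] ∨
            ∃ d z', W ++ R = d :: z' ∧ PySem.Chars.isspace d = true := by
          cases hWc : W with
          | nil =>
              simp only [List.nil_append]
              rcases pv_dropWhile_head (fun x => !pvIsB x) rest with hRe | ⟨d, z, hRe, hd⟩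
              · exact Or.inl (by rw [hR, hRe])
              · refine Or.inr ⟨d, z, by rw [hR, hRe], ?_⟩
                exact pv_isB_isspace d (by simpa using hd)
          | cons w ws =>
              refine Or.inr ⟨w, ws ++ R, by simp, ?_⟩
              have hw : w ∈ List.takeWhile PySem.Chars.isspace (c :: T).reverse := by
                have : w ∈ W := by rw [hWc]; simp
                simpa [hW] using this
              exact List.mem_takeWhile_imp hw
        rw [show (c :: rest : List Char) = PySem.Chars.rstrip (c :: T) ++ (W ++ R) from by
          conv_lhs => rw [show c :: rest = (c :: T) ++ R by rw [List.cons_append, ← hrest],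
            hsplit]
          rw [List.append_assoc]]
        exact (pv_prefix_drop _ pv_pat_nonspace _ _ hz).symm

lemma pv_scan_bridge (ls : List String) :
    pvScanLines ls = pvScanChars (ls.map String.toList) := by
  induction ls with
  | nil => rfl
  | cons ln rest ih =>
      simp only [pvScanLines, pvScanChars, List.map_cons, PySem.Str.len_eq,
        PySem.Str.toList_strip, PySem.Str.startswith_eq, Int.natCast_eq_zero, ih]

-- ===== VERDICT (by name: the statement is the Claim_ definition above) =====
theorem is_scratch_cell_spec : Claim_equal_is_scratch_cell := by
  intro source _
  unfold Spec_is_scratch_cell is_scratch_cell is_scratch_cell_alt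
  rw [PySem.Str.startswith_eq, PySem.Str.toList_lstrip]
  by_cases h0 : PySem.Str.len source = 0
  · rw [if_pos h0]
    have hnil : source.toList = [] := by
      rw [PySem.Str.len_eq] at h0
      exact List.length_eq_zero_iff.mp (by exact_mod_cast h0)
    rw [hnil]
    simp [PySem.Chars.startswith, PySem.Chars.lstrip, pv_pat_chars]
  · rw [if_neg h0, pv_scan_bridge, PySem.Str.splitlines_map_toList, pv_splitlines_eq,
      pv_main source.toList [] (by simp)]
    rfl
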